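-- pv_equiv track=rewrite | github.com/Jv131103/estudos_python | problemas_fase2/problema24/src/main.py | gerar_binarios_fila
-- ===== SOURCE A (Python) =====
-- class Fila:
--
--     def __init__(self):
--         self.dados = []
--
--     def enqueue(self, valor):
--         self.dados.append(valor)
--
--     def dequeue(self):
--         if not self.is_empty():
--             return self.dados.pop(0)
--
--     def peek(self):
--         if not self.is_empty():
--             return self.dados[0]
--
--     def is_empty(self):
--         return len(self.dados) == 0
--
-- def gerar_binarios_fila(n):
--     fila = Fila()
--     fila.enqueue("1")
--     resultado = []
--
--     for _ in range(n):
--         atual = fila.dequeue()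
--         resultado.append(atual)
--
--         fila.enqueue(atual + "0")
--         fila.enqueue(atual + "1")
--
--     return resultado
-- ===== SOURCE B (Python) =====
-- def gerar_binarios_fila(n):
--     return [format(i, "b") for i in range(1, n + 1)]
-- ===== Notes on version B (the rewrite author's own statement) =====
-- stated objective: faster
-- what changed: Replaces the BFS queue (with O(n) pop(0) from a Python list) by a direct closed form: the i-th output is the binary representation of i, so B just formats 1..n in binary.
import Mathlib
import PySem

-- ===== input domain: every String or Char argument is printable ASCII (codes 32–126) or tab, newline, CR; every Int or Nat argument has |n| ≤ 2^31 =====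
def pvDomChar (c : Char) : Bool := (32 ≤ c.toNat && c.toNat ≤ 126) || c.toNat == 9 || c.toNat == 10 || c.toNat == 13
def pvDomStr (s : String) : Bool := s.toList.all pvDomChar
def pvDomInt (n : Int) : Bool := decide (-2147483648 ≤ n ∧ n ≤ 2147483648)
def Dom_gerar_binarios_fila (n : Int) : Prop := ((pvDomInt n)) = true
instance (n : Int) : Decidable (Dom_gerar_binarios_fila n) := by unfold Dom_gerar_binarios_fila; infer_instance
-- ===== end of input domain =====

-- B replaces A's BFS queue generation by the closed form "binary of i for i = 1..n" (asymptotically faster).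


-- ===== PORT A =====
-- the loop over range(n): queue 'fila', accumulator 'resultado'; the queue is never
-- empty in any actual run (each step pops one element and pushes two), so the [] branch
-- (where Python's dequeue would return None and 'None + "0"' would raise) is unreachable.
def gbLoopA : Nat → List String → List String → List String
  | 0, _, res => res
  | _ + 1, [], res => res          -- unreachable (queue never empty)
  | f + 1, a :: rest, res => gbLoopA f (rest ++ [a ++ "0", a ++ "1"]) (res ++ [a])

def gerar_binarios_fila (n : Int) : List String :=
  gbLoopA n.toNat ["1"] []

-- ===== PORT B =====
-- binStr m = format(m, "b") for m ≥ 1 (B only calls it on 1..n)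
def binStr : Nat → String
  | 0 => "0"
  | 1 => "1"
  | m + 2 => binStr ((m + 2) / 2) ++ (if (m + 2) % 2 = 0 then "0" else "1")
decreasing_by exact Nat.div_lt_self (by omega) (by omega)

def gerar_binarios_fila_alt (n : Int) : List String :=
  (PySem.List.pyRange 1 (n + 1) 1).map (fun i => binStr i.toNat)

-- ===== PRECONDITION & SPEC =====
def Spec_gerar_binarios_fila (n : Int) (out : List String) : Prop := out = gerar_binarios_fila_alt n
instance (n : Int) (out : List String) : Decidable (Spec_gerar_binarios_fila n out) := by unfold Spec_gerar_binarios_fila; infer_instance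

-- ===== CLAIM (what is proved, stated in full; the proofs are below) =====
def Claim_equal_gerar_binarios_fila : Prop := ∀ (n : Int), Dom_gerar_binarios_fila n → Spec_gerar_binarios_fila n (gerar_binarios_fila n)

-- ===== LEMMAS AND PROOFS =====

-- binary strings of the two children of node k
lemma binStr_double {k : Nat} (hk : 1 ≤ k) : binStr (2 * k) = binStr k ++ "0" := by
  obtain ⟨k', rfl⟩ : ∃ k', k = k' + 1 := ⟨k - 1, by omega⟩
  have h1 : 2 * (k' + 1) = 2 * k' + 2 := by ring
  rw [h1, binStr]
  have h2 : (2 * k' + 2) / 2 = k' + 1 := by omega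
  have h3 : (2 * k' + 2) % 2 = 0 := by omega
  simp [h2, h3]

lemma binStr_double_succ {k : Nat} (hk : 1 ≤ k) : binStr (2 * k + 1) = binStr k ++ "1" := by
  obtain ⟨k', rfl⟩ : ∃ k', k = k' + 1 := ⟨k - 1, by omega⟩
  have h1 : 2 * (k' + 1) + 1 = (2 * k' + 1) + 2 := by ring
  rw [h1, binStr]
  have h2 : ((2 * k' + 1) + 2) / 2 = k' + 1 := by omega
  have h3 : ((2 * k' + 1) + 2) % 2 = 1 := by omega
  simp [h2, h3]

-- the BFS invariant: about to emit node k, the queue holds binStr k .. binStr (2k-1)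
lemma gbLoopA_inv : ∀ (f k : Nat) (res : List String), 1 ≤ k →
    gbLoopA f ((List.range' k k).map binStr) res = res ++ (List.range' k f).map binStr := by
  intro f
  induction f with
  | zero => intro k res _; simp [gbLoopA]
  | succ f ih =>
    intro k res hk
    obtain ⟨k', rfl⟩ : ∃ k', k = k' + 1 := ⟨k - 1, by omega⟩
    rw [List.range'_succ, List.map_cons]
    show gbLoopA (f + 1) (binStr (k' + 1) :: (List.range' (k' + 2) k').map binStr) res = _
    rw [gbLoopA]
    have hq : (List.range' (k' + 2) k').map binStr
        ++ [binStr (k' + 1) ++ "0", binStr (k' + 1) ++ "1"]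
        = (List.range' (k' + 2) (k' + 2)).map binStr := by
      rw [← binStr_double (by omega), ← binStr_double_succ (by omega)]
      have : [binStr (2 * (k' + 1)), binStr (2 * (k' + 1) + 1)]
          = (List.range' (2 * (k' + 1)) 2).map binStr := by
        simp [List.range'_succ]
      rw [this, ← List.map_append]
      have h2 : 2 * (k' + 1) = k' + 2 + 1 * k' := by ring
      rw [h2, List.range'_append]
    rw [hq, ih (k' + 2) (res ++ [binStr (k' + 1)]) (by omega)]
    rw [List.range'_succ, List.map_cons]
    simp

lemma gbA_closed (n : Int) : gerar_binarios_fila n = (List.range' 1 n.toNat).map binStr := by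
  unfold gerar_binarios_fila
  have h : (["1"] : List String) = (List.range' 1 1).map binStr := by
    simp [List.range'_succ, binStr]
  rw [h, gbLoopA_inv n.toNat 1 [] (by omega)]
  simp

lemma gbB_closed (n : Int) : gerar_binarios_fila_alt n = (List.range' 1 n.toNat).map binStr := by
  unfold gerar_binarios_fila_alt
  rw [PySem.List.pyRange_one]
  have hn : n + 1 - 1 = n := by ring
  rw [hn, List.range'_eq_map_range]
  simp only [List.map_map]
  apply List.map_congr_left
  intro k _
  simp only [Function.comp_apply]
  congr 1

-- ===== VERDICT (by name: the statement is the Claim_ definition above) =====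
theorem gerar_binarios_fila_spec : Claim_equal_gerar_binarios_fila := by
  intro n _
  unfold Spec_gerar_binarios_fila
  rw [gbA_closed, gbB_closed]
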